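-- pv_equiv track=rewrite | github.com/alan-turing-institute/graph-attention-replanner | graph_attention_replanner/method/enumeration/permutation.py | generate_int_row_possibilities
-- ===== SOURCE A (Python) =====
-- import itertools
--
-- def generate_int_row_possibilities(row, col):
--     true_count = sum(row)
--     if true_count == 0:
--         return [list(0 for _ in range(col))]
--
--     possibilities = []
--     for perm in list(itertools.permutations(range(1, true_count + 1))):
--         perm = list(perm)
--         new_row = []
--         perm_index = 0
--         for cell in row:
--             if cell:
--                 new_row.append(perm[perm_index])
--                 perm_index += 1
--             else:
--                 new_row.append(0)
--         possibilities.append(list(new_row))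
--     return possibilities
-- ===== SOURCE B (Python) =====
-- def _factorials(n):
--     """[0!, 1!, ..., n!]"""
--     fact = [1]
--     f = 1
--     for k in range(1, n + 1):
--         f = f * k
--         fact.append(f)
--     return fact
--
-- def _unrank(idx, avail, fact):
--     """The idx-th (in lexicographic order) permutation of avail, decoded via the
--     factorial number system: the leading element is avail[idx // (m-1)!]."""
--     if not avail:
--         return []
--     d, r = divmod(idx, fact[len(avail) - 1])
--     return [avail[d]] + _unrank(r, avail[:d] + avail[d + 1:], fact)
--
-- def generate_int_row_possibilities(row, col):
--     n = sum(row)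
--     if n == 0:
--         return [[0] * col]
--     fact = _factorials(n)
--     positions = [i for i, c in enumerate(row) if c]
--     out = []
--     for idx in range(fact[n]):
--         perm = _unrank(idx, list(range(1, n + 1)), fact)
--         new_row = [0] * len(row)
--         for pos, val in zip(positions, perm):
--             new_row[pos] = val
--         out.append(new_row)
--     return out
-- ===== Notes on version B (the rewrite author's own statement) =====
-- stated objective: alternative
-- what changed: B replaces itertools.permutations entirely: it counts up an integer rank from 0 to sum(row)!-1 and decodes each rank into the corresponding lexicographic permutation via the factorial number system (recursive unranking with a precomputed factorial table), then scatters the decoded values into a zero row at the precomputed nonzero positions; A enumerates permutations with itertools and rescans every cell per permutation.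
import Mathlib
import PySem

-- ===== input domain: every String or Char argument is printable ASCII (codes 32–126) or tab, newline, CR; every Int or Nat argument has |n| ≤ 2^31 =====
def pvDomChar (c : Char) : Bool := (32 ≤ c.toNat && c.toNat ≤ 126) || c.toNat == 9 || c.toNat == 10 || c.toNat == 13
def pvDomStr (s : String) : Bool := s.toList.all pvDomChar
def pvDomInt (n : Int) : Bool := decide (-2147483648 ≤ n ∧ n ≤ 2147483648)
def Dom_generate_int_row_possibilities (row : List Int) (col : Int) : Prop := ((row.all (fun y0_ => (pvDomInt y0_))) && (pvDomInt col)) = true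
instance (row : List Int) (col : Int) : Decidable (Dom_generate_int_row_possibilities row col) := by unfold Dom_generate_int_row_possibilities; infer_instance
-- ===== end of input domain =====

-- B drops itertools.permutations: it counts ranks 0..sum! - 1 and decodes each rank into its
-- lexicographic permutation by factorial-number-system unranking, then scatters the values into a
-- zero row at the precomputed nonzero positions; alternative algorithm, no speed claim.

-- ===== PORT A =====
-- itertools.permutations(l) in lexicographic-by-index order; fuel = l.length (exact: each
-- recursive call erases one element).
def pvPermsLexN : Nat → List Int → List (List Int)
  | 0, _ => [[]]
  | n + 1, l =>
      (List.range l.length).flatMap (fun i =>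
        (pvPermsLexN n (l.eraseIdx i)).map (fun p => l.getD i 0 :: p))

def pvPermsLex (l : List Int) : List (List Int) := pvPermsLexN l.length l

def generate_int_row_possibilities (row : List Int) (col : Int) : List (List Int) :=
  let true_count := row.sum
  if true_count = 0 then [(PySem.List.pyRange 0 col 1).map (fun _ => (0 : Int))]
  else
    (pvPermsLex (PySem.List.pyRange 1 (true_count + 1) 1)).map (fun perm =>
      (row.foldl (fun (st : List Int × Int) cell =>
        if cell ≠ 0 then (st.1 ++ [PySem.List.pyGetD perm st.2 0], st.2 + 1)
        else (st.1 ++ [(0 : Int)], st.2)) ([], 0)).1)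

-- ===== PORT B =====
-- _unrank from Source B; fuel = avail.length (exact: each recursive call removes one element of avail).
def pvUnrank : Nat → Int → List Int → List Int → List Int
  | 0, _, _, _ => []
  | m + 1, idx, avail, fact =>
      if avail.isEmpty then []
      else
        let f := PySem.List.pyGetD fact ((avail.length : Int) - 1) 0
        let d := PySem.Int.floordiv idx f
        let r := PySem.Int.mod idx f
        PySem.List.pyGetD avail d 0 ::
          pvUnrank m r (PySem.List.slice avail none (some d) ++
                        PySem.List.slice avail (some (d + 1)) none) fact

def generate_int_row_possibilities_alt (row : List Int) (col : Int) : List (List Int) :=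
  let n := row.sum
  if n = 0 then [List.replicate col.toNat (0 : Int)]
  else
    -- _factorials(n): fact = [1]; f = 1; for k in range(1, n+1): f = f*k; fact.append(f)
    let fact := ((PySem.List.pyRange 1 (n + 1) 1).foldl
        (fun (st : List Int × Int) k => (st.1 ++ [st.2 * k], st.2 * k)) ([1], 1)).1
    let positions := (PySem.List.enumerate row 0).filterMap
      (fun ic => if ic.2 ≠ 0 then some ic.1 else none)
    (PySem.List.pyRange 0 (PySem.List.pyGetD fact n 0) 1).map (fun idx =>
      let perm := pvUnrank n.toNat idx (PySem.List.pyRange 1 (n + 1) 1) fact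
      (positions.zip perm).foldl (fun nr pv => PySem.List.pySetD nr pv.1 pv.2)
        (List.replicate row.length (0 : Int)))

-- ===== PRECONDITION & SPEC =====
-- Pre_ excludes exactly the inputs where A raises IndexError: sum(row) ≠ 0 while the number of
-- nonzero cells exceeds sum(row) (perm has only sum(row) entries). A returns on all other inputs.
def Pre_generate_int_row_possibilities (row : List Int) (col : Int) : Prop :=
  row.sum = 0 ∨ ((row.filter (fun c => decide (c ≠ 0))).length : Int) ≤ row.sum
instance (row : List Int) (col : Int) : Decidable (Pre_generate_int_row_possibilities row col) := by
  unfold Pre_generate_int_row_possibilities; infer_instance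
def pvWitness_generate_int_row_possibilities : List Int × Int := ([1, 1, 0], 3)

def Spec_generate_int_row_possibilities (row : List Int) (col : Int) (out : List (List Int)) : Prop := out = generate_int_row_possibilities_alt row col
instance (row : List Int) (col : Int) (out : List (List Int)) : Decidable (Spec_generate_int_row_possibilities row col out) := by unfold Spec_generate_int_row_possibilities; infer_instance

-- ===== CLAIM (what is proved, stated in full; the proofs are below) =====
def Claim_equal_generate_int_row_possibilities : Prop := ∀ (row : List Int) (col : Int), Dom_generate_int_row_possibilities row col → Pre_generate_int_row_possibilities row col → Spec_generate_int_row_possibilities row col (generate_int_row_possibilities row col)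

-- ===== LEMMAS AND PROOFS =====

-- count of nonzero cells
def pvCnt (cs : List Int) : Nat := (cs.filter (fun c => decide (c ≠ 0))).length

-- the common per-permutation specification: place successive values of `vals` at the nonzero cells
def pvPlace : List Int → List Int → List Int
  | [], _ => []
  | c :: cs, vals =>
      if c ≠ 0 then vals.headD 0 :: pvPlace cs vals.tail else 0 :: pvPlace cs vals

-- nonzero positions, as a structural recursion
def pvPosN : List Int → List Nat
  | [] => []
  | c :: cs => if c ≠ 0 then 0 :: (pvPosN cs).map (· + 1) else (pvPosN cs).map (· + 1)

-- A's scan, as a structural recursion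
def pvRecA (perm : List Int) : List Int → Int → List Int
  | [], _ => []
  | c :: cs, k =>
      if c ≠ 0 then PySem.List.pyGetD perm k 0 :: pvRecA perm cs (k + 1)
      else 0 :: pvRecA perm cs k

lemma pvFoldA (perm : List Int) (cs : List Int) :
    ∀ (acc : List Int) (k : Int),
      (cs.foldl (fun (st : List Int × Int) cell =>
        if cell ≠ 0 then (st.1 ++ [PySem.List.pyGetD perm st.2 0], st.2 + 1)
        else (st.1 ++ [(0 : Int)], st.2)) (acc, k)).1 = acc ++ pvRecA perm cs k := by
  induction cs with
  | nil => intro acc k; simp [pvRecA]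
  | cons c cs ih =>
      intro acc k
      rw [List.foldl_cons]
      by_cases hc : c ≠ 0
      · rw [if_pos hc, ih]
        simp [pvRecA, hc]
      · rw [if_neg hc, ih]
        simp [pvRecA, hc]

lemma pvRecA_eq_place (perm : List Int) (cs : List Int) :
    ∀ (k : Nat), pvCnt cs + k ≤ perm.length →
      pvRecA perm cs (k : Int) = pvPlace cs (perm.drop k) := by
  induction cs with
  | nil => intro k _; simp [pvRecA, pvPlace]
  | cons c cs ih =>
      intro k hk
      by_cases hc : c ≠ 0
      · have hcnt : pvCnt (c :: cs) = pvCnt cs + 1 := by simp [pvCnt, hc]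
        have hklt : k < perm.length := by omega
        have h1 : PySem.List.pyGetD perm (k : Int) 0 = perm[k] := by
          rw [PySem.List.pyGetD_eq_getElem] <;> simp [hklt] <;> omega
        have h2 : (perm.drop k).headD 0 = perm[k] := by
          rw [List.headD_eq_head?_getD, List.head?_drop]
          simp [List.getElem?_eq_getElem hklt]
        have h3 : ((k : Int) + 1) = ((k + 1 : Nat) : Int) := by push_cast; ring
        simp only [pvRecA, pvPlace, if_pos hc]
        rw [h1, h3, ih (k + 1) (by omega), List.tail_drop, h2]
      · have hcnt : pvCnt (c :: cs) = pvCnt cs := by simp [pvCnt, hc]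
        simp only [pvRecA, pvPlace, if_neg hc]
        rw [ih k (by omega)]

lemma pvEnumPos (cs : List Int) : ∀ (s : Int),
    (PySem.List.enumerate cs s).filterMap (fun ic => if ic.2 ≠ 0 then some ic.1 else none)
      = (pvPosN cs).map (fun (n : Nat) => s + (n : Int)) := by
  induction cs with
  | nil => intro s; simp [PySem.List.enumerate_nil, pvPosN]
  | cons c cs ih =>
      intro s
      rw [PySem.List.enumerate_cons]
      by_cases hc : c ≠ 0
      · rw [List.filterMap_cons]
        simp only [if_pos hc, ih (s + 1), pvPosN, List.map_cons, List.map_map]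
        refine congrArg₂ List.cons (by push_cast; ring) ?_
        exact List.map_congr_left (fun n _ => by simp [Function.comp]; push_cast; ring)
      · rw [List.filterMap_cons]
        simp only [if_neg hc, ih (s + 1), pvPosN, List.map_map]
        exact List.map_congr_left (fun n _ => by simp [Function.comp]; push_cast; ring)

lemma pvScatterShift (ps : List (Nat × Int)) :
    ∀ (x : Int) (t : List Int),
      List.foldl (fun a (p : Nat × Int) => a.set p.1 p.2) (x :: t)
          (ps.map (Prod.map (· + 1) id))
        = x :: List.foldl (fun a (p : Nat × Int) => a.set p.1 p.2) t ps := by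
  induction ps with
  | nil => intro x t; simp
  | cons p ps ih => intro x t; simp [ih]

lemma pvScatter_eq_place (cs : List Int) :
    ∀ (perm : List Int), pvCnt cs ≤ perm.length →
      List.foldl (fun a (p : Nat × Int) => a.set p.1 p.2)
          (List.replicate cs.length (0 : Int)) ((pvPosN cs).zip perm)
        = pvPlace cs perm := by
  induction cs with
  | nil => intro perm _; simp [pvPosN, pvPlace]
  | cons c cs ih =>
      intro perm hlen
      by_cases hc : c ≠ 0
      · have hcnt : pvCnt (c :: cs) = pvCnt cs + 1 := by simp [pvCnt, hc]
        obtain ⟨v, vs, rfl⟩ : ∃ v vs, perm = v :: vs := by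
          cases perm with
          | nil => exfalso; rw [hcnt] at hlen; simp at hlen
          | cons v vs => exact ⟨v, vs, rfl⟩
        simp only [pvPosN, if_pos hc, pvPlace, List.length_cons]
        rw [List.replicate_succ, List.zip_cons_cons, List.foldl_cons]
        have hz : ((pvPosN cs).map (· + 1)).zip vs
            = ((pvPosN cs).zip vs).map (Prod.map (· + 1) id) := by
          rw [List.zip_map_left]
        rw [hz]
        simp only [List.set_cons_zero]
        rw [pvScatterShift]
        rw [ih vs (by rw [hcnt] at hlen; simp at hlen; omega)]
        simp
      · have hcnt : pvCnt (c :: cs) = pvCnt cs := by simp [pvCnt, hc]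
        simp only [pvPosN, if_neg hc, pvPlace, List.length_cons]
        rw [List.replicate_succ]
        have hz : ((pvPosN cs).map (· + 1)).zip perm
            = ((pvPosN cs).zip perm).map (Prod.map (· + 1) id) := by
          rw [List.zip_map_left]
        rw [hz, pvScatterShift, ih perm (by omega)]

lemma pvPermsLexN_length : ∀ (n : Nat) (l : List Int), l.length = n →
    ∀ p ∈ pvPermsLexN n l, p.length = n := by
  intro n
  induction n with
  | zero => intro l _ p hp; simp [pvPermsLexN] at hp; simp [hp]
  | succ n ih =>
      intro l hl p hp
      simp only [pvPermsLexN, List.mem_flatMap, List.mem_range, List.mem_map] at hp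
      obtain ⟨i, hi, q, hq, rfl⟩ := hp
      have : (l.eraseIdx i).length = n := by
        rw [List.length_eraseIdx_of_lt hi]; omega
      simp [ih (l.eraseIdx i) this q hq]

-- the factorial-table fold of B computes [0!, 1!, …, m!] with running value m!
lemma pvFactFold (m : Nat) :
    (PySem.List.pyRange 1 ((m : Int) + 1) 1).foldl
        (fun (st : List Int × Int) k => (st.1 ++ [st.2 * k], st.2 * k)) ([1], 1)
      = ((List.range (m + 1)).map (fun k => (Nat.factorial k : Int)),
         (Nat.factorial m : Int)) := by
  induction m with
  | zero => simp [PySem.List.pyRange_one_eq_nil, Nat.factorial]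
  | succ m ih =>
      have hsplit : PySem.List.pyRange 1 ((m : Int) + 1 + 1) 1
          = PySem.List.pyRange 1 ((m : Int) + 1) 1 ++ [(m : Int) + 1] := by
        exact PySem.List.pyRange_one_succ_right (by omega)
      have hcast : ((m + 1 : Nat) : Int) + 1 = (m : Int) + 1 + 1 := by push_cast; ring
      rw [hcast, hsplit, List.foldl_append, ih]
      have hfac : (Nat.factorial m : Int) * ((m : Int) + 1)
          = (Nat.factorial (m + 1) : Int) := by
        rw [Nat.factorial_succ]; push_cast; ring
      simp only [List.foldl_cons, List.foldl_nil, hfac]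
      rw [List.range_succ (n := m + 1)]
      simp

-- reading the factorial table
lemma pvFactGet (m k : Nat) (hk : k ≤ m) :
    PySem.List.pyGetD ((List.range (m + 1)).map (fun j => (Nat.factorial j : Int))) (k : Int) 0
      = (Nat.factorial k : Int) := by
  rw [PySem.List.pyGetD_natCast]
  rw [List.getD_eq_getElem?_getD, List.getElem?_map, List.getElem?_range (by omega)]
  simp

-- splitting range (a * f) into a blocks of size f
lemma pvRangeMul (a f : Nat) :
    List.range (a * f)
      = (List.range a).flatMap (fun i => (List.range f).map (fun r => i * f + r)) := by
  induction a with
  | zero => simp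
  | succ a ih =>
      have h1 : (a + 1) * f = a * f + f := by ring
      rw [h1, List.range_add, ih, List.range_succ]
      simp

-- unranking ranks 0..m!-1 enumerates the permutations in the same order as pvPermsLexN
lemma pvUnrankEnum : ∀ (m : Nat) (avail fact : List Int), avail.length = m →
    (∀ k : Nat, k < m → PySem.List.pyGetD fact (k : Int) 0 = (Nat.factorial k : Int)) →
    (List.range (Nat.factorial m)).map (fun (i : Nat) => pvUnrank m ((i : Nat) : Int) avail fact)
      = pvPermsLexN m avail := by
  intro m
  induction m with
  | zero =>
      intro avail fact _ _
      simp [Nat.factorial, List.range_succ, pvUnrank, pvPermsLexN]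
  | succ m ih =>
      intro avail fact hlen hfact
      have hne : avail.isEmpty = false := by
        cases avail with
        | nil => simp at hlen
        | cons a l => simp
      have hfpos : 0 < Nat.factorial m := Nat.factorial_pos m
      rw [Nat.factorial_succ, pvRangeMul, List.map_flatMap]
      simp only [pvPermsLexN, hlen]
      apply List.flatMap_congr
      intro i hi
      rw [List.mem_range] at hi
      set f := Nat.factorial m with hf
      have hstep : ∀ r : Nat, r < f →
          pvUnrank (m + 1) ((i * f + r : Nat) : Int) avail fact
            = avail.getD i 0 :: pvUnrank m ((r : Nat) : Int) (avail.eraseIdx i) fact := by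
        intro r hr
        have hidx : ((avail.length : Int) - 1) = (m : Int) := by rw [hlen]; push_cast; ring
        have hfe : PySem.List.pyGetD fact ((avail.length : Int) - 1) 0 = ((f : Nat) : Int) := by
          rw [hidx, hfact m (by omega)]
        have hdiv : (i * f + r) / f = i := by
          rw [Nat.add_comm, Nat.add_mul_div_right r i hfpos, Nat.div_eq_of_lt hr]
          omega
        have hmod : (i * f + r) % f = r := by
          rw [Nat.add_comm, Nat.add_mul_mod_self_right, Nat.mod_eq_of_lt hr]
        have hslice : PySem.List.slice avail none (some ((i : Nat) : Int)) ++
              PySem.List.slice avail (some (((i : Nat) : Int) + 1)) none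
            = avail.eraseIdx i := by
          have h1 : PySem.List.slice avail none (some ((i : Nat) : Int)) = avail.take i :=
            PySem.List.slice_to_natCast avail i
          have hc : ((i : Nat) : Int) + 1 = ((i + 1 : Nat) : Int) := by push_cast; ring
          have h2 : PySem.List.slice avail (some (((i : Nat) : Int) + 1)) none
              = avail.drop (i + 1) := by rw [hc]; exact PySem.List.slice_from_natCast avail (i + 1)
          rw [h1, h2, List.eraseIdx_eq_take_drop_succ]
        simp only [pvUnrank, hne, Bool.false_eq_true, if_false, hfe,
          PySem.Int.floordiv_natCast, PySem.Int.mod_natCast, hdiv, hmod,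
          PySem.List.pyGetD_natCast, hslice]
      rw [List.map_map]
      have hmc : (List.range f).map ((fun i' : Nat => pvUnrank (m + 1) ((i' : Nat) : Int) avail fact) ∘ (fun r => i * f + r))
          = (List.range f).map (fun r => avail.getD i 0 :: pvUnrank m ((r : Nat) : Int) (avail.eraseIdx i) fact) := by
        apply List.map_congr_left
        intro r hrm
        rw [List.mem_range] at hrm
        exact hstep r hrm
      rw [hmc]
      have helen : (avail.eraseIdx i).length = m := by
        rw [List.length_eraseIdx_of_lt (by omega)]; omega
      have hih := ih (avail.eraseIdx i) fact helen (fun k hk => hfact k (by omega))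
      rw [← hih, List.map_map]
      rfl

-- corollary of pvUnrankEnum over the Int-valued rank list that the B port maps over
lemma pvUnrankEnumInt (m : Nat) (avail fact : List Int) (hlen : avail.length = m)
    (hfact : ∀ k : Nat, k < m → PySem.List.pyGetD fact (k : Int) 0 = (Nat.factorial k : Int)) :
    ((List.range (Nat.factorial m)).map (fun (k : Nat) => ((k : Nat) : Int))).map
        (fun idx : Int => pvUnrank m idx avail fact)
      = pvPermsLexN m avail := by
  rw [List.map_map]
  exact pvUnrankEnum m avail fact hlen hfact

-- ===== VERDICT (by name: the statement is the Claim_ definition above) =====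
theorem generate_int_row_possibilities_spec : Claim_equal_generate_int_row_possibilities := by
  intro row col _ hpre
  unfold Spec_generate_int_row_possibilities
  simp only [generate_int_row_possibilities, generate_int_row_possibilities_alt]
  by_cases hs : row.sum = 0
  · rw [if_pos hs, if_pos hs]
    have hlen : (PySem.List.pyRange 0 col 1).length = col.toNat := by
      rw [PySem.List.length_pyRange_one]; omega
    rw [List.map_const', hlen]
  · rw [if_neg hs, if_neg hs]
    have hcnt : ((row.filter (fun c => decide (c ≠ 0))).length : Int) ≤ row.sum := by
      rcases hpre with h | h
      · exact absurd h hs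
      · exact h
    have hpos : 0 < row.sum := by
      have : (0 : Int) ≤ ((row.filter (fun c => decide (c ≠ 0))).length : Int) := by positivity
      omega
    set m := row.sum.toNat with hm
    have hsum : row.sum = (m : Int) := by rw [hm]; omega
    have havail : (PySem.List.pyRange 1 (row.sum + 1) 1).length = m := by
      rw [PySem.List.length_pyRange_one]; omega
    have hfl : ((PySem.List.pyRange 1 (row.sum + 1) 1).foldl
        (fun (st : List Int × Int) k => (st.1 ++ [st.2 * k], st.2 * k)) ([1], 1)).1
        = (List.range (m + 1)).map (fun k => (Nat.factorial k : Int)) := by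
      rw [hsum, pvFactFold m]
    rw [hfl]
    have hget : PySem.List.pyGetD ((List.range (m + 1)).map (fun k => (Nat.factorial k : Int)))
        row.sum 0 = (Nat.factorial m : Int) := by
      rw [hsum]; exact pvFactGet m m (le_refl m)
    rw [hget, PySem.List.pyRange_zero_natCast]
    have henum := pvUnrankEnumInt m (PySem.List.pyRange 1 (row.sum + 1) 1)
        ((List.range (m + 1)).map (fun k => (Nat.factorial k : Int))) havail
        (fun k hk => pvFactGet m k (by omega))
    unfold pvPermsLex
    rw [havail, ← henum, List.map_map, List.map_map, List.map_map]
    apply List.map_congr_left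
    intro i hi
    simp only [Function.comp_apply]
    have hmem : pvUnrank m ((i : Nat) : Int)
        (PySem.List.pyRange 1 (row.sum + 1) 1)
        ((List.range (m + 1)).map (fun k => (Nat.factorial k : Int))) ∈
        pvPermsLexN m (PySem.List.pyRange 1 (row.sum + 1) 1) := by
      rw [← henum, List.map_map]
      exact List.mem_map_of_mem hi
    set perm := pvUnrank m ((i : Nat) : Int)
        (PySem.List.pyRange 1 (row.sum + 1) 1)
        ((List.range (m + 1)).map (fun k => (Nat.factorial k : Int))) with hperm
    have hplen : perm.length = m :=
      pvPermsLexN_length m (PySem.List.pyRange 1 (row.sum + 1) 1) havail perm hmem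
    have hcl : pvCnt row ≤ perm.length := by
      unfold pvCnt; rw [hplen]; omega
    rw [pvFoldA]
    have hA : pvRecA perm row 0 = pvPlace row perm := by
      have h := pvRecA_eq_place perm row 0 (by omega)
      simpa using h
    rw [List.nil_append, hA]
    rw [pvEnumPos row 0]
    have hcast : (pvPosN row).map (fun (n : Nat) => (0 : Int) + (n : Int))
        = (pvPosN row).map (fun (n : Nat) => (n : Int)) := by
      apply List.map_congr_left; intro n _; ring
    rw [hcast]
    have hzc : ((pvPosN row).map (fun (n : Nat) => (n : Int))).zip perm
        = ((pvPosN row).zip perm).map (Prod.map (fun (n : Nat) => (n : Int)) id) := by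
      rw [List.zip_map_left]
    rw [hzc]
    have hsetD : List.foldl (fun nr (pv : Int × Int) => PySem.List.pySetD nr pv.1 pv.2)
          (List.replicate row.length (0 : Int))
          (((pvPosN row).zip perm).map (Prod.map (fun (n : Nat) => (n : Int)) id))
        = List.foldl (fun a (p : Nat × Int) => a.set p.1 p.2)
          (List.replicate row.length (0 : Int)) ((pvPosN row).zip perm) := by
      rw [List.foldl_map]
      apply PySem.List.foldl_congr_mem
      intro a p _
      simp [PySem.List.pySetD_natCast, Prod.map]
    rw [hsetD, pvScatter_eq_place row perm hcl]
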